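-- pv_equiv track=rewrite | github.com/JakeDruett/asgard | Asgard/Heimdall/Architecture/services/_solid_detectors.py | _split_method_name
-- ===== SOURCE A (Python) =====
-- from typing import List, Set
--
-- def _split_method_name(name: str) -> List[str]:
--     """Split a method name into lowercase word parts on underscores and camelCase."""
--     parts: List[str] = []
--     current: List[str] = []
--     for char in name:
--         if char == "_":
--             if current:
--                 parts.append("".join(current).lower())
--                 current = []
--         elif char.isupper() and current:
--             parts.append("".join(current).lower())
--             current = [char.lower()]
--         else:
--             current.append(char.lower())
--     if current:
--         parts.append("".join(current))
--     return parts
-- ===== SOURCE B (Python) =====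
-- from typing import List
--
-- def _split_method_name(name: str) -> List[str]:
--     """Split a method name into lowercase word parts on underscores and camelCase."""
--     parts: List[str] = []
--     for token in name.split("_"):
--         current = ""
--         for ch in token:
--             if ch.isupper() and current:
--                 parts.append(current)
--                 current = ch.lower()
--             else:
--                 current += ch.lower()
--         if current:
--             parts.append(current)
--     return parts
-- ===== Notes on version B (the rewrite author's own statement) =====
-- stated objective: alternative
-- what changed: B first splits the name into underscore-delimited tokens with str.split and then runs a camelCase-only buffer scan over each token, instead of A's single pass whose one loop handles underscores, uppercase flushes and ordinary characters in three branches.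
import Mathlib
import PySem

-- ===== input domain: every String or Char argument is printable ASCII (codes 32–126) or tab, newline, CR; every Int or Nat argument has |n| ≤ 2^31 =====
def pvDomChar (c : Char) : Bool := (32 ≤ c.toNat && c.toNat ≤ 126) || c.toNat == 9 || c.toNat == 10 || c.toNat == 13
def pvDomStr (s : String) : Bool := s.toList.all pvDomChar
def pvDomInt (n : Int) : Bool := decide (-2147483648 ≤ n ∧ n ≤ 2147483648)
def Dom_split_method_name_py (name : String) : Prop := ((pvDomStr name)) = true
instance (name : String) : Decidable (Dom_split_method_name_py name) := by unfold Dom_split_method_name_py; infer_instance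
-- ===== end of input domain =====

-- B replaces A's single three-branch pass with str.split('_') followed by a camelCase-only
-- per-token scan (objective: alternative decomposition, same cost).

-- ===== PORT A =====
-- one step of A's for-loop; state = (parts, current)
def pvAstep (st : List (List Char) × List Char) (c : Char) : List (List Char) × List Char :=
  if c = '_' then
    if st.2 ≠ [] then (st.1 ++ [PySem.Chars.lower st.2], []) else st
  else if PySem.Chars.isupper c && !st.2.isEmpty then
    (st.1 ++ [PySem.Chars.lower st.2], [PySem.Chars.lowerChar c])
  else
    (st.1, st.2 ++ [PySem.Chars.lowerChar c])

def split_method_name_py (name : String) : List String :=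
  let st := name.toList.foldl pvAstep ([], [])
  (if st.2 ≠ [] then st.1 ++ [st.2] else st.1).map String.ofList

-- ===== PORT B =====
-- one step of B's inner camelCase-only scan; state = (parts, current)
def pvBscan (st : List (List Char) × List Char) (c : Char) : List (List Char) × List Char :=
  if PySem.Chars.isupper c && !st.2.isEmpty then
    (st.1 ++ [st.2], [PySem.Chars.lowerChar c])
  else
    (st.1, st.2 ++ [PySem.Chars.lowerChar c])

-- B's outer loop body: scan one underscore-token with a fresh buffer, flush the leftover
def pvBtoken (parts : List (List Char)) (tok : List Char) : List (List Char) :=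
  let st := tok.foldl pvBscan (parts, [])
  if st.2 ≠ [] then st.1 ++ [st.2] else st.1

def split_method_name_py_alt (name : String) : List String :=
  ((PySem.Chars.splitOn name.toList ['_']).foldl pvBtoken []).map String.ofList

-- ===== PRECONDITION & SPEC =====
def Spec_split_method_name_py (name : String) (out : List String) : Prop := out = split_method_name_py_alt name
instance (name : String) (out : List String) : Decidable (Spec_split_method_name_py name out) := by unfold Spec_split_method_name_py; infer_instance

-- ===== CLAIM (what is proved, stated in full; the proofs are below) =====
def Claim_equal_split_method_name_py : Prop := ∀ (name : String), Dom_split_method_name_py name → Spec_split_method_name_py name (split_method_name_py name)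

-- ===== LEMMAS AND PROOFS =====

theorem pvChar_le_iff (c d : Char) : (c ≤ d) ↔ c.toNat ≤ d.toNat := by
  rw [Char.le_def, UInt32.le_iff_toNat_le]; exact Iff.rfl

theorem pvIsupper_iff (c : Char) : PySem.Chars.isupper c = true ↔ 65 ≤ c.toNat ∧ c.toNat ≤ 90 := by
  simp only [PySem.Chars.isupper, Bool.and_eq_true, decide_eq_true_eq, pvChar_le_iff]
  exact Iff.rfl

theorem pvLowerChar_idem (c : Char) :
    PySem.Chars.lowerChar (PySem.Chars.lowerChar c) = PySem.Chars.lowerChar c := by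
  by_cases h : PySem.Chars.isupper c = true
  · obtain ⟨h1, h2⟩ := (pvIsupper_iff c).mp h
    have hv : (c.toNat + 32).isValidChar := Or.inl (by omega)
    have htn : (Char.ofNat (c.toNat + 32)).toNat = c.toNat + 32 := by
      unfold Char.ofNat
      rw [dif_pos hv]
      simp only [Char.ofNatAux, Char.toNat, UInt32.toNat, BitVec.toNat_ofNatLT]
    have hnot : PySem.Chars.isupper (Char.ofNat (c.toNat + 32)) = false := by
      rw [Bool.eq_false_iff]
      intro hcon
      obtain ⟨g1, g2⟩ := (pvIsupper_iff _).mp hcon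
      omega
    simp [PySem.Chars.lowerChar, h, hnot]
  · simp only [Bool.not_eq_true] at h
    simp [PySem.Chars.lowerChar, h]

theorem pvLower_snoc (cur : List Char) (c : Char) (h : PySem.Chars.lower cur = cur) :
    PySem.Chars.lower (cur ++ [PySem.Chars.lowerChar c]) = cur ++ [PySem.Chars.lowerChar c] := by
  simp [PySem.Chars.lower] at h ⊢
  exact ⟨h, pvLowerChar_idem c⟩

-- proof-side split of a char list at '_' : (first token, remaining tokens)
def pvTok : List Char → List Char × List (List Char)
  | [] => ([], [])
  | c :: cs =>
      let r := pvTok cs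
      if c = '_' then ([], r.1 :: r.2) else (c :: r.1, r.2)

-- proof-side name for the shared final flush
def pvFlushA (st : List (List Char) × List Char) : List (List Char) :=
  if st.2 ≠ [] then st.1 ++ [st.2] else st.1

theorem pvGo_spec : ∀ (l : List Char) (cur : List Char) (acc : List (List Char)) (fuel : Nat),
    l.length < fuel →
    PySem.Chars.splitOn.go ['_'] fuel l cur acc =
      acc.reverse ++ (cur.reverse ++ (pvTok l).1) :: (pvTok l).2 := by
  intro l
  induction l with
  | nil =>
      intro cur acc fuel hf
      cases fuel with
      | zero => omega
      | succ f => simp [PySem.Chars.splitOn.go, pvTok]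
  | cons c rest ih =>
      intro cur acc fuel hf
      cases fuel with
      | zero => simp at hf
      | succ f =>
        by_cases hc : c = '_'
        · subst hc
          have hpre : List.isPrefixOf ['_'] ('_' :: rest) = true := by
            simp [List.isPrefixOf]
          rw [show PySem.Chars.splitOn.go ['_'] (f+1) ('_' :: rest) cur acc =
              PySem.Chars.splitOn.go ['_'] f (List.drop (['_'] : List Char).length ('_' :: rest)) [] (cur.reverse :: acc) by
            simp [PySem.Chars.splitOn.go, hpre]]
          simp only [List.length_singleton, List.drop_succ_cons, List.drop_zero]
          rw [ih [] (cur.reverse :: acc) f (by simpa using hf)]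
          simp [pvTok]
        · have hpre : List.isPrefixOf ['_'] (c :: rest) = false := by
            simp [List.isPrefixOf]
            exact fun h => hc h.symm
          rw [show PySem.Chars.splitOn.go ['_'] (f+1) (c :: rest) cur acc =
              PySem.Chars.splitOn.go ['_'] f rest (c :: cur) acc by
            simp [PySem.Chars.splitOn.go, hpre]]
          rw [ih (c :: cur) acc f (by simpa using hf)]
          simp [pvTok, hc]

theorem pvSplitOn_eq (cs : List Char) :
    PySem.Chars.splitOn cs ['_'] = (pvTok cs).1 :: (pvTok cs).2 := by
  unfold PySem.Chars.splitOn
  rw [pvGo_spec cs [] [] (cs.length + 1) (by omega)]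
  simp

-- core invariant: A's loop continued from (parts, cur), cur already lowered, computes
-- B's per-token processing of the remaining tokens, the first token continuing the buffer
theorem pvMain : ∀ (cs : List Char) (parts : List (List Char)) (cur : List Char),
    PySem.Chars.lower cur = cur →
    pvFlushA (cs.foldl pvAstep (parts, cur)) =
      (pvTok cs).2.foldl pvBtoken (pvFlushA ((pvTok cs).1.foldl pvBscan (parts, cur))) := by
  intro cs
  induction cs with
  | nil => intro parts cur h; simp [pvTok]
  | cons c rest ih =>
      intro parts cur h
      by_cases hc : c = '_'
      · subst hc
        by_cases hcur : cur = []
        · subst hcur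
          have h1 : List.foldl pvAstep (parts, ([] : List Char)) ('_' :: rest) =
              List.foldl pvAstep (parts, []) rest := by
            simp [pvAstep]
          rw [h1, ih parts [] (by simp [PySem.Chars.lower])]
          simp [pvTok, pvBtoken, pvFlushA]
        · have h1 : List.foldl pvAstep (parts, cur) ('_' :: rest) =
              List.foldl pvAstep (parts ++ [cur], []) rest := by
            simp [pvAstep, hcur, h]
          rw [h1, ih (parts ++ [cur]) [] (by simp [PySem.Chars.lower])]
          simp [pvTok, pvBtoken, pvFlushA, hcur]
      · by_cases hup : (PySem.Chars.isupper c && !cur.isEmpty) = true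
        · have hcur : cur ≠ [] := by
            intro hn; subst hn; simp at hup
          have h1 : List.foldl pvAstep (parts, cur) (c :: rest) =
              List.foldl pvAstep (parts ++ [cur], [PySem.Chars.lowerChar c]) rest := by
            simp [pvAstep, hc, hup, h]
          have h2 : List.foldl pvBscan (parts, cur) ((pvTok (c :: rest)).1) =
              List.foldl pvBscan (parts ++ [cur], [PySem.Chars.lowerChar c]) ((pvTok rest).1) := by
            simp [pvTok, hc, pvBscan, hup]
          have h3 : (pvTok (c :: rest)).2 = (pvTok rest).2 := by simp [pvTok, hc]
          rw [h1, h2, h3,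
            ih (parts ++ [cur]) [PySem.Chars.lowerChar c]
              (by simp [PySem.Chars.lower, pvLowerChar_idem])]
        · have h1 : List.foldl pvAstep (parts, cur) (c :: rest) =
              List.foldl pvAstep (parts, cur ++ [PySem.Chars.lowerChar c]) rest := by
            simp only [List.foldl_cons, pvAstep, if_neg hc, hup, Bool.false_eq_true, if_false]
          have h2 : List.foldl pvBscan (parts, cur) ((pvTok (c :: rest)).1) =
              List.foldl pvBscan (parts, cur ++ [PySem.Chars.lowerChar c]) ((pvTok rest).1) := by
            simp only [pvTok, if_neg hc, List.foldl_cons, pvBscan, hup, Bool.false_eq_true,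
              if_false]
          have h3 : (pvTok (c :: rest)).2 = (pvTok rest).2 := by simp [pvTok, hc]
          rw [h1, h2, h3, ih parts (cur ++ [PySem.Chars.lowerChar c]) (pvLower_snoc cur c h)]

-- ===== VERDICT (by name: the statement is the Claim_ definition above) =====
theorem split_method_name_py_spec : Claim_equal_split_method_name_py := by
  intro name _
  unfold Spec_split_method_name_py split_method_name_py split_method_name_py_alt
  rw [pvSplitOn_eq]
  simp only [List.foldl_cons]
  have hb : (pvTok name.toList).2.foldl pvBtoken (pvBtoken [] (pvTok name.toList).1) =
      (pvTok name.toList).2.foldl pvBtoken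
        (pvFlushA ((pvTok name.toList).1.foldl pvBscan ([], []))) := rfl
  rw [hb, ← pvMain name.toList [] [] (by simp [PySem.Chars.lower])]
  rfl
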